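-- pv_equiv track=rewrite | github.com/nilanjanajui/Project--DataBase-Design-Studio | DBMS Project/backend/key_utils.py | find_superkeys
-- ===== SOURCE A (Python) =====
-- from typing import List, Set, Tuple, FrozenSet, Dict
-- from itertools import combinations
--
-- def powerset(attributes: List[str], max_size: int = None) -> List[Set[str]]:
--     """
--     Generate powerset of attributes up to size `max_size`.
--     """
--     max_size = max_size or len(attributes)
--     return [set(s) for i in range(1, max_size + 1) for s in combinations(attributes, i)]
--
-- def find_superkeys(
--     candidate_keys: List[Set[str]], attributes: List[str], max_comb_size: int = 5
-- ) -> List[Set[str]]: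
--     """
--     Generate superkeys based on candidate keys by adding extra attributes.
--     """
--     all_attrs = set(attributes)
--     superkeys_set = set()
--     for key in candidate_keys:
--         remaining = all_attrs - key
--         for extras in powerset(list(remaining), max_comb_size):
--             superkey = frozenset(key.union(extras))
--             superkeys_set.add(superkey)
--         superkeys_set.add(frozenset(key))
--     return [set(sk) for sk in sorted(superkeys_set, key=lambda x: (len(x), sorted(x)))]
-- ===== SOURCE B (Python) =====
-- def find_superkeys(candidate_keys, attributes, max_comb_size=5):
--     """
--     Generate superkeys by breadth-first growth: starting from each candidate key,
--     grow the set of extra attributes one attribute per level, up to max_comb_size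
--     levels (a falsy max_comb_size means "no limit", as in the original).
--     """
--     all_attrs = set(attributes)
--     superkeys = set()
--     for key in candidate_keys:
--         remaining = all_attrs - key
--         depth = max_comb_size if max_comb_size else len(remaining)
--         order = list(remaining)
--         seen = {frozenset()}
--         frontier = [frozenset()]
--         for _ in range(depth):
--             if not frontier:
--                 break
--             nxt = []
--             for ex in frontier:
--                 for a in order:
--                     if a not in ex:
--                         ex2 = ex | {a}
--                         if ex2 not in seen:
--                             seen.add(ex2)
--                             nxt.append(ex2)
--             frontier = nxt
--         for ex in seen:
--             # materialise the superkey as key + its extras (extras taken in `order`)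
--             superkeys.add(frozenset(key.union(set(a for a in order if a in ex))))
--     return [set(sk) for sk in sorted(superkeys, key=lambda x: (len(x), sorted(x)))]
-- ===== Notes on version B (the rewrite author's own statement) =====
-- stated objective: alternative
-- what changed: Replaces the powerset/combinations generator with a per-key breadth-first growth: each candidate key is extended one attribute per level (up to max_comb_size levels, all remaining attributes when max_comb_size is falsy), deduplicating through a visited set, instead of materialising every attribute combination up front.
import Mathlib
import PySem

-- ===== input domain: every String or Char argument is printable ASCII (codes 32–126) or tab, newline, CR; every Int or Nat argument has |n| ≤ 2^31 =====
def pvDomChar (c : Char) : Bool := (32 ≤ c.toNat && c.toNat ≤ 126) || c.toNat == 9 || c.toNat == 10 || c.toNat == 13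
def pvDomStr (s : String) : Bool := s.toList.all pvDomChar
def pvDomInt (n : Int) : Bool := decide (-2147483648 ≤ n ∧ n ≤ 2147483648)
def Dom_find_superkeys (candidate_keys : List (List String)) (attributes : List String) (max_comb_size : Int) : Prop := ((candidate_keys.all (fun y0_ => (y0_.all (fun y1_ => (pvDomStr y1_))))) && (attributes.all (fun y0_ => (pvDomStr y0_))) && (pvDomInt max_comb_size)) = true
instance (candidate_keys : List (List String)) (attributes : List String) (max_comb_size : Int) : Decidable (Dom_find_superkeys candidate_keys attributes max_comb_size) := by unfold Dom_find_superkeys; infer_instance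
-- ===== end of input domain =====

-- B re-enumerates the superkeys by per-key breadth-first one-attribute growth instead of A's
-- powerset/combinations generator; objective: alternative decomposition, equal cost (return value only).
--
-- Representation note (both ports): a Python set/frozenset value is modelled as the list of its
-- DISTINCT elements; Python's hash iteration order over a set is not modelled, so both ports
-- represent every frozenset by its canonical (sorted) element list, and every place a set's order
-- is consumed (the final sorted(..., key=(len, sorted)) whose key is injective on distinct
-- frozensets, and set-into-set insertion) is order-insensitive in the Python.
def pvCanon (xs : List String) : List String :=
  PySem.List.sorted (PySem.Set.ofList xs) (fun x => x)

-- ===== PORT A =====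
-- powerset(attributes, max_size): `max_size or len(attributes)` (0 is falsy), then
-- [set(s) for i in range(1, max_size+1) for s in combinations(attributes, i)]
def powerset (attributes : List String) (max_size : Int) : List (List String) :=
  let max_size : Int := if max_size = 0 then (attributes.length : Int) else max_size
  (PySem.List.pyRange 1 (max_size + 1)).foldl
    (fun acc i => acc ++ (PySem.List.combinations attributes i.toNat).map (fun s => PySem.Set.ofList s)) []

def find_superkeys (candidate_keys : List (List String)) (attributes : List String) (max_comb_size : Int) : List (List String) :=
  let all_attrs : PySem.Set String := PySem.Set.ofList attributes
  let superkeys_set : PySem.Set (List String) :=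
    candidate_keys.foldl (fun superkeys_set key =>
      let keyS : PySem.Set String := PySem.Set.ofList key
      let remaining := PySem.Set.diff all_attrs keyS
      -- list(remaining) is iterated in the set's (unmodelled) order; the resulting SET of
      -- frozensets does not depend on that order, so the diff list's own order is used.
      let superkeys_set := (powerset remaining max_comb_size).foldl
        (fun sks extras => PySem.Set.add sks (pvCanon (PySem.Set.union keyS extras))) superkeys_set
      PySem.Set.add superkeys_set (pvCanon keyS)) PySem.Set.empty
  (PySem.List.sorted2 superkeys_set (fun x => (x.length : Int)) (fun x => PySem.List.sorted x (fun y => y))).map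
    (fun sk => PySem.Set.ofList sk)

-- ===== PORT B =====
-- one BFS level over the extras sets: for ex in frontier: for a in order: if a not in ex:
--   ex2 = ex | {a}; if ex2 not in seen: seen.add(ex2); nxt.append(ex2)   (state = (seen, nxt))
def bfsLevel (order : List String) (frontier : List (List String))
    (st : PySem.Set (List String) × List (List String)) : PySem.Set (List String) × List (List String) :=
  frontier.foldl (fun st ex =>
    order.foldl (fun st a =>
      if a ∈ ex then st
      else
        let ex2 := pvCanon (PySem.Set.union ex (PySem.Set.ofList [a]))
        if ex2 ∈ st.1 then st else (PySem.Set.add st.1 ex2, st.2 ++ [ex2])) st) st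

-- for _ in range(depth): if not frontier: break; one bfsLevel; then frontier = nxt
def bfsGrow (order : List String) : Nat → PySem.Set (List String) → List (List String) → PySem.Set (List String)
  | 0, seen, _ => seen
  | Nat.succ n, seen, frontier =>
      if frontier.isEmpty then seen
      else
        let st := bfsLevel order frontier (seen, [])
        bfsGrow order n st.1 st.2

def find_superkeys_alt (candidate_keys : List (List String)) (attributes : List String) (max_comb_size : Int) : List (List String) :=
  let all_attrs : PySem.Set String := PySem.Set.ofList attributes
  let superkeys : PySem.Set (List String) :=
    candidate_keys.foldl (fun superkeys key =>
      let keyS : PySem.Set String := PySem.Set.ofList key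
      let remaining := PySem.Set.diff all_attrs keyS
      let depth : Int := if max_comb_size ≠ 0 then max_comb_size else (remaining.length : Int)
      -- list(remaining) is iterated in the set's (unmodelled) order; the SET of results does
      -- not depend on that order, so the diff list's own order is used (as in port A).
      let seen := bfsGrow remaining depth.toNat (PySem.Set.ofList [([] : List String)]) [[]]
      seen.foldl (fun superkeys ex =>
        PySem.Set.add superkeys
          (pvCanon (PySem.Set.union keyS
            (PySem.Set.ofList (remaining.filter (fun a => decide (a ∈ ex))))))) superkeys)
      PySem.Set.empty
  (PySem.List.sorted2 superkeys (fun x => (x.length : Int)) (fun x => PySem.List.sorted x (fun y => y))).map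
    (fun sk => PySem.Set.ofList sk)

-- ===== PRECONDITION & SPEC =====
def Spec_find_superkeys (candidate_keys : List (List String)) (attributes : List String) (max_comb_size : Int) (out : List (List String)) : Prop := out = find_superkeys_alt candidate_keys attributes max_comb_size
instance (candidate_keys : List (List String)) (attributes : List String) (max_comb_size : Int) (out : List (List String)) : Decidable (Spec_find_superkeys candidate_keys attributes max_comb_size out) := by unfold Spec_find_superkeys; infer_instance

-- ===== CLAIM (what is proved, stated in full; the proofs are below) =====
def Claim_equal_find_superkeys : Prop := ∀ (candidate_keys : List (List String)) (attributes : List String) (max_comb_size : Int), Dom_find_superkeys candidate_keys attributes max_comb_size → Spec_find_superkeys candidate_keys attributes max_comb_size (find_superkeys candidate_keys attributes max_comb_size)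

-- ===== LEMMAS AND PROOFS =====

-- canonical-representative facts
lemma mem_pvCanon (xs : List String) (y : String) : y ∈ pvCanon xs ↔ y ∈ xs := by
  simp [pvCanon, PySem.List.mem_sorted, PySem.Set.mem_ofList]

lemma pvCanon_pairwise (xs : List String) : (pvCanon xs).Pairwise (· < ·) :=
  PySem.List.sorted_ofList_pairwise_lt xs

lemma pvCanon_ext {xs ys : List String} (h : ∀ y, y ∈ xs ↔ y ∈ ys) : pvCanon xs = pvCanon ys := by
  unfold pvCanon
  refine PySem.List.sorted_eq_of_perm_of_pairwise_lt _ _ _ ?_ (pvCanon_pairwise ys)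
  refine (PySem.List.sorted_perm _ _ _).trans ?_
  refine (List.perm_ext_iff_of_nodup (PySem.Set.nodup_ofList _) (PySem.Set.nodup_ofList _)).mpr ?_
  intro a; simp [PySem.Set.mem_ofList, h a]

lemma sorted_pvCanon (xs : List String) : PySem.List.sorted (pvCanon xs) (fun y => y) = pvCanon xs :=
  PySem.List.sorted_eq_self_of_pairwise _ _ ((pvCanon_pairwise xs).imp (fun h => le_of_lt h))

-- the remaining attributes and the per-key size bound
def pvRem (key attrs : List String) : List String :=
  PySem.Set.diff (PySem.Set.ofList attrs) (PySem.Set.ofList key)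

def pvBnd (key attrs : List String) (m : Int) : Int :=
  if m = 0 then ((pvRem key attrs).length : Int) else m

lemma nodup_pvRem (key attrs : List String) : (pvRem key attrs).Nodup := by
  unfold pvRem; exact PySem.Set.nodup_diff _ _ (PySem.Set.nodup_ofList _)

-- "y is the canonical form of key plus exactly n extra attributes"
def pvGen (key attrs : List String) (n : Nat) (y : List String) : Prop :=
  ∃ E, E.Sublist (pvRem key attrs) ∧ E.length = n ∧ y = pvCanon (key ++ E)

lemma pvGen_zero (key attrs : List String) (y : List String) :
    pvGen key attrs 0 y ↔ y = pvCanon key := by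
  unfold pvGen
  constructor
  · rintro ⟨E, -, hlen, rfl⟩
    have : E = [] := List.eq_nil_of_length_eq_zero hlen
    subst this; simp
  · rintro rfl
    exact ⟨[], List.nil_sublist _, rfl, by simp⟩

-- unified membership characterisation both ports are reduced to
def pvChar (candidate_keys : List (List String)) (attributes : List String) (max_comb_size : Int)
    (y : List String) : Prop :=
  ∃ key ∈ candidate_keys, ∃ d ≤ (pvBnd key attributes max_comb_size).toNat, pvGen key attributes d y

-- ---------- A side ----------
def pvAset (candidate_keys : List (List String)) (attributes : List String) (max_comb_size : Int) :
    PySem.Set (List String) :=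
  candidate_keys.foldl (fun superkeys_set key =>
    PySem.Set.add
      ((powerset (PySem.Set.diff (PySem.Set.ofList attributes) (PySem.Set.ofList key)) max_comb_size).foldl
        (fun sks extras => PySem.Set.add sks (pvCanon (PySem.Set.union (PySem.Set.ofList key) extras)))
        superkeys_set)
      (pvCanon (PySem.Set.ofList key))) PySem.Set.empty

lemma A_eq (candidate_keys : List (List String)) (attributes : List String) (max_comb_size : Int) :
    find_superkeys candidate_keys attributes max_comb_size =
      (PySem.List.sorted2 (pvAset candidate_keys attributes max_comb_size)
        (fun x => (x.length : Int)) (fun x => PySem.List.sorted x (fun y => y))).map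
        (fun sk => PySem.Set.ofList sk) := rfl

lemma mem_powerset {rem : List String} (hnd : rem.Nodup) (m : Int) (e : List String) :
    e ∈ powerset rem m ↔
      ∃ E, E.Sublist rem ∧ 1 ≤ E.length ∧
        (E.length : Int) ≤ (if m = 0 then (rem.length : Int) else m) ∧ e = E := by
  unfold powerset
  rw [PySem.List.foldl_append_eq_flatMap]
  simp only [List.nil_append, List.mem_flatMap, List.mem_map, PySem.List.mem_pyRange_one,
    PySem.List.mem_combinations_iff]
  constructor
  · rintro ⟨i, ⟨hi1, hi2⟩, c, ⟨hsubc, hlenc⟩, rfl⟩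
    refine ⟨c, hsubc, ?_, ?_, PySem.Set.ofList_eq_self_of_nodup _ (hsubc.nodup hnd)⟩
    · omega
    · omega
  · rintro ⟨E, hsubE, h1, h2, rfl⟩
    refine ⟨(e.length : Int), ⟨by omega, by omega⟩, e, ⟨hsubE, by omega⟩,
      PySem.Set.ofList_eq_self_of_nodup _ (hsubE.nodup hnd)⟩

lemma nodup_foldl_add {β : Type} (f : β → List String) :
    ∀ (l : List β) (acc : PySem.Set (List String)), acc.Nodup →
      (l.foldl (fun s b => PySem.Set.add s (f b)) acc).Nodup := by
  intro l
  induction l with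
  | nil => intro acc h; exact h
  | cons b l ih => intro acc h; exact ih _ (PySem.Set.nodup_add _ _ h)

lemma mem_pvAset_aux (attributes : List String) (max_comb_size : Int) :
    ∀ (cks : List (List String)) (acc : PySem.Set (List String)) (y : List String),
      y ∈ cks.foldl (fun superkeys_set key =>
        PySem.Set.add
          ((powerset (PySem.Set.diff (PySem.Set.ofList attributes) (PySem.Set.ofList key)) max_comb_size).foldl
            (fun sks extras => PySem.Set.add sks (pvCanon (PySem.Set.union (PySem.Set.ofList key) extras)))
            superkeys_set)
          (pvCanon (PySem.Set.ofList key))) acc ↔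
      y ∈ acc ∨ ∃ key ∈ cks, ∃ d ≤ (pvBnd key attributes max_comb_size).toNat, pvGen key attributes d y := by
  intro cks
  induction cks with
  | nil => intro acc y; simp
  | cons k cks ih =>
    intro acc y
    rw [List.foldl_cons, ih]
    have hstep : y ∈ PySem.Set.add
        ((powerset (PySem.Set.diff (PySem.Set.ofList attributes) (PySem.Set.ofList k)) max_comb_size).foldl
          (fun sks extras => PySem.Set.add sks (pvCanon (PySem.Set.union (PySem.Set.ofList k) extras))) acc)
        (pvCanon (PySem.Set.ofList k)) ↔
        y ∈ acc ∨ ∃ d ≤ (pvBnd k attributes max_comb_size).toNat, pvGen k attributes d y := by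
      rw [PySem.Set.mem_add, PySem.Set.mem_foldl_add]
      have hpow := mem_powerset (rem := pvRem k attributes) (nodup_pvRem k attributes) max_comb_size
      constructor
      · rintro ((hy | ⟨e, he, rfl⟩) | hy)
        · exact Or.inl hy
        · obtain ⟨E, hsubE, h1, h2, rfl⟩ := (hpow e).1 he
          refine Or.inr ⟨e.length, by unfold pvBnd; omega, e, hsubE, rfl, ?_⟩
          apply pvCanon_ext
          intro x
          simp [PySem.Set.mem_union, PySem.Set.mem_ofList, List.mem_append]
        · refine Or.inr ⟨0, Nat.zero_le _, (pvGen_zero _ _ _).2 ?_⟩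
          rw [hy]
          exact pvCanon_ext (fun x => PySem.Set.mem_ofList k x)
      · rintro (hy | ⟨d, hd, E, hsubE, hlen, rfl⟩)
        · exact Or.inl (Or.inl hy)
        · rcases Nat.eq_zero_or_pos d with h0 | hpos
          · subst h0
            have hE : E = [] := List.eq_nil_of_length_eq_zero hlen
            subst hE
            refine Or.inr ?_
            rw [List.append_nil]
            exact (pvCanon_ext (fun x => (PySem.Set.mem_ofList k x).symm)).symm ▸
              (pvCanon_ext (fun x => (PySem.Set.mem_ofList k x))).symm
          · refine Or.inl (Or.inr ⟨E, (hpow E).2 ⟨E, hsubE, by omega, by unfold pvBnd at hd; omega, rfl⟩, ?_⟩)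
            apply pvCanon_ext
            intro x
            simp [PySem.Set.mem_union, PySem.Set.mem_ofList, List.mem_append]
    rw [hstep]
    constructor
    · rintro ((hy | hk) | ⟨key, hkey, hrest⟩)
      · exact Or.inl hy
      · exact Or.inr ⟨k, List.mem_cons_self, hk⟩
      · exact Or.inr ⟨key, List.mem_cons_of_mem _ hkey, hrest⟩
    · rintro (hy | ⟨key, hkey, hrest⟩)
      · exact Or.inl (Or.inl hy)
      · rcases List.mem_cons.1 hkey with rfl | hkey'
        · exact Or.inl (Or.inr hrest)
        · exact Or.inr ⟨key, hkey', hrest⟩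

lemma mem_pvAset (candidate_keys : List (List String)) (attributes : List String) (max_comb_size : Int)
    (y : List String) :
    y ∈ pvAset candidate_keys attributes max_comb_size ↔
      pvChar candidate_keys attributes max_comb_size y := by
  unfold pvAset pvChar
  rw [mem_pvAset_aux]
  simp [PySem.Set.empty]

lemma nodup_pvAset (candidate_keys : List (List String)) (attributes : List String) (max_comb_size : Int) :
    (pvAset candidate_keys attributes max_comb_size).Nodup := by
  unfold pvAset
  generalize hacc : PySem.Set.empty = acc
  have hnd : acc.Nodup := by rw [← hacc]; exact List.nodup_nil
  clear hacc
  induction candidate_keys generalizing acc with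
  | nil => exact hnd
  | cons k cks ih =>
    rw [List.foldl_cons]
    exact ih _ (PySem.Set.nodup_add _ _ (nodup_foldl_add _ _ _ hnd))

-- ---------- B side ----------
-- "e is the canonical form of exactly n extra attributes"
def pvExGen (key attrs : List String) (n : Nat) (e : List String) : Prop :=
  ∃ E, E.Sublist (pvRem key attrs) ∧ E.length = n ∧ e = pvCanon E

lemma pvCanon_nil : pvCanon ([] : List String) = [] := rfl

lemma pvExGen_zero (key attrs : List String) (e : List String) :
    pvExGen key attrs 0 e ↔ e = [] := by
  unfold pvExGen
  constructor
  · rintro ⟨E, -, hlen, rfl⟩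
    have : E = [] := List.eq_nil_of_length_eq_zero hlen
    subst this
    exact pvCanon_nil
  · rintro rfl
    exact ⟨[], List.nil_sublist _, rfl, pvCanon_nil.symm⟩

lemma pvExGen_unique {key attrs : List String} {d₁ d₂ : Nat} {e : List String}
    (h₁ : pvExGen key attrs d₁ e) (h₂ : pvExGen key attrs d₂ e) : d₁ = d₂ := by
  obtain ⟨E₁, hs₁, hl₁, he₁⟩ := h₁
  obtain ⟨E₂, hs₂, hl₂, he₂⟩ := h₂
  have hc : pvCanon E₁ = pvCanon E₂ := he₁.symm.trans he₂
  have hmem : ∀ x, x ∈ E₁ ↔ x ∈ E₂ := by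
    intro x; rw [← mem_pvCanon E₁ x, hc, mem_pvCanon]
  have hperm : E₁.Perm E₂ :=
    (List.perm_ext_iff_of_nodup (hs₁.nodup (nodup_pvRem key attrs))
      (hs₂.nodup (nodup_pvRem key attrs))).mpr hmem
  rw [← hl₁, ← hl₂, hperm.length_eq]

lemma pvExGen_step_fwd {key attrs : List String} {c : Nat} {ex : List String} {a : String}
    (hs : pvExGen key attrs c ex) (ha : a ∈ pvRem key attrs) (hna : a ∉ ex) :
    pvExGen key attrs (c + 1) (pvCanon (PySem.Set.union ex (PySem.Set.ofList [a]))) := by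
  obtain ⟨E, hsub, hlen, rfl⟩ := hs
  have hnaE : a ∉ E := fun h => hna ((mem_pvCanon _ _).2 h)
  have hndE : E.Nodup := hsub.nodup (nodup_pvRem key attrs)
  have hfilt : ∀ x, x ∈ (pvRem key attrs).filter (fun x => decide (x ∈ E) || decide (x = a)) ↔
      x ∈ E ++ [a] := by
    intro x
    simp only [List.mem_filter, Bool.or_eq_true, decide_eq_true_eq, List.mem_append,
      List.mem_singleton]
    constructor
    · rintro ⟨-, h⟩; exact h
    · rintro (h | h)
      · exact ⟨hsub.subset h, Or.inl h⟩
      · exact ⟨h ▸ ha, Or.inr h⟩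
  refine ⟨(pvRem key attrs).filter (fun x => decide (x ∈ E) || decide (x = a)),
    List.filter_sublist, ?_, ?_⟩
  · have hnda : (E ++ [a]).Nodup := by
      rw [List.nodup_append]
      refine ⟨hndE, List.nodup_singleton _, ?_⟩
      intro x hx b hb
      rw [List.mem_singleton] at hb
      subst hb
      intro hxa
      exact hnaE (hxa ▸ hx)
    have hperm : ((pvRem key attrs).filter (fun x => decide (x ∈ E) || decide (x = a))).Perm
        (E ++ [a]) :=
      (List.perm_ext_iff_of_nodup ((nodup_pvRem key attrs).filter _) hnda).mpr hfilt
    rw [hperm.length_eq]; simp [hlen]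
  · apply pvCanon_ext
    intro x
    rw [hfilt x]
    simp only [PySem.Set.mem_union, PySem.Set.mem_ofList, mem_pvCanon, List.mem_append,
      List.mem_singleton]

lemma pvExGen_step_bwd {key attrs : List String} {c : Nat} {e : List String}
    (h : pvExGen key attrs (c + 1) e) :
    ∃ ex, pvExGen key attrs c ex ∧ ∃ a ∈ pvRem key attrs, a ∉ ex ∧
      e = pvCanon (PySem.Set.union ex (PySem.Set.ofList [a])) := by
  obtain ⟨E, hsub, hlen, rfl⟩ := h
  have hne : E ≠ [] := by intro h; subst h; simp at hlen
  have hEa : E.dropLast ++ [E.getLast hne] = E := List.dropLast_append_getLast hne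
  have hsub' : E.dropLast.Sublist (pvRem key attrs) := (List.dropLast_sublist E).trans hsub
  have hndE : E.Nodup := hsub.nodup (nodup_pvRem key attrs)
  have haE' : E.getLast hne ∉ E.dropLast := by
    have h2 := hndE
    rw [← hEa, List.nodup_append] at h2
    intro hmem
    exact h2.2.2 _ hmem _ (List.mem_singleton_self _) rfl
  have haRem : E.getLast hne ∈ pvRem key attrs := hsub.subset (E.getLast_mem hne)
  refine ⟨pvCanon E.dropLast,
    ⟨E.dropLast, hsub', by rw [List.length_dropLast, hlen]; rfl, rfl⟩,
    E.getLast hne, haRem, ?_, ?_⟩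
  · intro hm
    exact haE' ((mem_pvCanon _ _).1 hm)
  · apply pvCanon_ext
    intro x
    simp only [PySem.Set.mem_union, PySem.Set.mem_ofList, mem_pvCanon, List.mem_singleton]
    have hx : x ∈ E ↔ x ∈ E.dropLast ∨ x = E.getLast hne := by
      conv_lhs => rw [← hEa]
      simp only [List.mem_append, List.mem_singleton]
    rw [hx]

lemma pvExGen_trunc {key attrs : List String} {d c : Nat} {e : List String}
    (h : pvExGen key attrs d e) (hc : c ≤ d) : ∃ z, pvExGen key attrs c z := by
  obtain ⟨E, hsub, hlen, -⟩ := h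
  exact ⟨pvCanon (E.take c), E.take c, (List.take_sublist c E).trans hsub,
    by rw [List.length_take, hlen]; omega, rfl⟩

def pvPairStep (st : PySem.Set (List String) × List (List String)) (p : List String × String) :
    PySem.Set (List String) × List (List String) :=
  if p.2 ∈ p.1 then st
  else
    let t := pvCanon (PySem.Set.union p.1 (PySem.Set.ofList [p.2]))
    if t ∈ st.1 then st else (PySem.Set.add st.1 t, st.2 ++ [t])

lemma bfsLevel_eq_pairfold (order : List String) (frontier : List (List String))
    (st : PySem.Set (List String) × List (List String)) :
    bfsLevel order frontier st =
      ((frontier.map (fun s => order.map (fun a => (s, a)))).flatten).foldl pvPairStep st := by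
  rw [List.foldl_flatten]
  simp only [List.foldl_map]
  rfl

lemma pairfold_mem (P : List (List String × String)) (seen0 : PySem.Set (List String)) :
    ∀ (S : PySem.Set (List String)) (N : List (List String)),
      (∀ y, y ∈ S ↔ y ∈ seen0 ∨ y ∈ N) →
      (∀ y, y ∈ (P.foldl pvPairStep (S, N)).1 ↔ y ∈ S ∨
          ∃ p ∈ P, p.2 ∉ p.1 ∧ y = pvCanon (PySem.Set.union p.1 (PySem.Set.ofList [p.2]))) ∧
      (∀ y, y ∈ (P.foldl pvPairStep (S, N)).2 ↔ y ∈ N ∨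
          (y ∉ seen0 ∧ ∃ p ∈ P, p.2 ∉ p.1 ∧ y = pvCanon (PySem.Set.union p.1 (PySem.Set.ofList [p.2])))) := by
  induction P with
  | nil =>
    intro S N hSN
    exact ⟨fun y => by simp, fun y => by simp⟩
  | cons p P ih =>
    intro S N hSN
    rw [List.foldl_cons]
    by_cases hmem : p.2 ∈ p.1
    · have hstep : pvPairStep (S, N) p = (S, N) := by simp [pvPairStep, hmem]
      rw [hstep]
      obtain ⟨h1, h2⟩ := ih S N hSN
      refine ⟨fun y => (h1 y).trans ?_, fun y => (h2 y).trans ?_⟩ <;>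
        · rw [List.exists_mem_cons_iff]
          tauto
    · by_cases hS : pvCanon (PySem.Set.union p.1 (PySem.Set.ofList [p.2])) ∈ S
      · have hstep : pvPairStep (S, N) p = (S, N) := by
          simp [pvPairStep, hmem, hS]
        rw [hstep]
        obtain ⟨h1, h2⟩ := ih S N hSN
        have hSN' := hSN (pvCanon (PySem.Set.union p.1 (PySem.Set.ofList [p.2])))
        refine ⟨fun y => (h1 y).trans ?_, fun y => (h2 y).trans ?_⟩
        · rw [List.exists_mem_cons_iff]
          constructor
          · tauto
          · rintro (hy | ⟨-, rfl⟩ | hy)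
            · exact Or.inl hy
            · exact Or.inl hS
            · exact Or.inr hy
        · rw [List.exists_mem_cons_iff]
          constructor
          · tauto
          · rintro (hy | ⟨hns, (⟨-, rfl⟩ | hy)⟩)
            · exact Or.inl hy
            · rcases hSN'.1 hS with h | h
              · exact absurd h hns
              · exact Or.inl h
            · exact Or.inr ⟨hns, hy⟩
      · have hstep : pvPairStep (S, N) p =
            (PySem.Set.add S (pvCanon (PySem.Set.union p.1 (PySem.Set.ofList [p.2]))),
              N ++ [pvCanon (PySem.Set.union p.1 (PySem.Set.ofList [p.2]))]) := by
          simp only [pvPairStep, if_neg hmem, if_neg hS]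
        rw [hstep, PySem.Set.add_of_not_mem hS]
        have htseen : pvCanon (PySem.Set.union p.1 (PySem.Set.ofList [p.2])) ∉ seen0 := fun h =>
          hS ((hSN _).2 (Or.inl h))
        have hSN' : ∀ y, y ∈ S ++ [pvCanon (PySem.Set.union p.1 (PySem.Set.ofList [p.2]))] ↔
            y ∈ seen0 ∨ y ∈ N ++ [pvCanon (PySem.Set.union p.1 (PySem.Set.ofList [p.2]))] := by
          intro y
          simp only [List.mem_append, List.mem_singleton]
          have := hSN y
          tauto
        obtain ⟨h1, h2⟩ := ih _ _ hSN'
        refine ⟨fun y => (h1 y).trans ?_, fun y => (h2 y).trans ?_⟩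
        · rw [List.exists_mem_cons_iff]
          simp only [List.mem_append, List.mem_singleton]
          constructor
          · rintro ((hy | rfl) | hy)
            · exact Or.inl hy
            · exact Or.inr (Or.inl ⟨hmem, rfl⟩)
            · exact Or.inr (Or.inr hy)
          · rintro (hy | ⟨-, rfl⟩ | hy)
            · exact Or.inl (Or.inl hy)
            · exact Or.inl (Or.inr rfl)
            · exact Or.inr hy
        · rw [List.exists_mem_cons_iff]
          simp only [List.mem_append, List.mem_singleton]
          constructor
          · rintro ((hy | rfl) | ⟨hns, hy⟩)
            · exact Or.inl hy
            · exact Or.inr ⟨htseen, Or.inl ⟨hmem, rfl⟩⟩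
            · exact Or.inr ⟨hns, Or.inr hy⟩
          · rintro (hy | ⟨hns, (⟨-, rfl⟩ | hy)⟩)
            · exact Or.inl (Or.inl hy)
            · exact Or.inl (Or.inr rfl)
            · exact Or.inr ⟨hns, hy⟩


lemma bfsGrow_mem (key attrs : List String) :
    ∀ (n c : Nat) (seen : PySem.Set (List String)) (frontier : List (List String)),
      (∀ y, y ∈ seen ↔ ∃ d ≤ c, pvExGen key attrs d y) →
      (∀ y, y ∈ frontier ↔ pvExGen key attrs c y) →
      ∀ y, y ∈ bfsGrow (pvRem key attrs) n seen frontier ↔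
        ∃ d ≤ c + n, pvExGen key attrs d y := by
  intro n
  induction n with
  | zero =>
    intro c seen frontier hseen hfr y
    simpa [bfsGrow] using hseen y
  | succ n ih =>
    intro c seen frontier hseen hfr y
    rw [bfsGrow]
    by_cases hfe : frontier.isEmpty
    · rw [if_pos hfe]
      rw [hseen y]
      constructor
      · rintro ⟨d, hd, hg⟩; exact ⟨d, by omega, hg⟩
      · rintro ⟨d, hd, hg⟩
        rcases Nat.lt_or_ge c d with hlt | hge
        · exfalso
          obtain ⟨z, hz⟩ := pvExGen_trunc hg (by omega : c ≤ d)
          have : z ∈ frontier := (hfr z).2 hz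
          rw [List.isEmpty_iff.1 hfe] at this
          simp at this
        · exact ⟨d, hge, hg⟩
    · rw [if_neg hfe]
      have hpf := pairfold_mem
        ((frontier.map (fun s => (pvRem key attrs).map (fun a => (s, a)))).flatten)
        seen seen [] (fun y => by simp)
      rw [bfsLevel_eq_pairfold]
      obtain ⟨h1, h2⟩ := hpf
      have hprod : ∀ z, (∃ p ∈ (frontier.map (fun s => (pvRem key attrs).map (fun a => (s, a)))).flatten,
          p.2 ∉ p.1 ∧ z = pvCanon (PySem.Set.union p.1 (PySem.Set.ofList [p.2]))) ↔
          pvExGen key attrs (c + 1) z := by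
        intro z
        constructor
        · rintro ⟨p, hp, hna, rfl⟩
          simp only [List.mem_flatten, List.mem_map] at hp
          obtain ⟨l, ⟨s, hs, rfl⟩, hpl⟩ := hp
          obtain ⟨a, ha, rfl⟩ := List.mem_map.1 hpl
          exact pvExGen_step_fwd ((hfr s).1 hs) ha hna
        · intro hg
          obtain ⟨ex, hgs, a, ha, hna, rfl⟩ := pvExGen_step_bwd hg
          refine ⟨(ex, a), ?_, hna, rfl⟩
          simp only [List.mem_flatten, List.mem_map]
          exact ⟨(pvRem key attrs).map (fun a => (ex, a)), ⟨ex, (hfr ex).2 hgs, rfl⟩,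
            List.mem_map.2 ⟨a, ha, rfl⟩⟩
      have hseen' : ∀ z, z ∈ (((frontier.map (fun s => (pvRem key attrs).map (fun a => (s, a)))).flatten).foldl pvPairStep (seen, [])).1 ↔
          ∃ d ≤ c + 1, pvExGen key attrs d z := by
        intro z
        rw [h1 z]
        constructor
        · rintro (hz | hz)
          · obtain ⟨d, hd, hg⟩ := (hseen z).1 hz
            exact ⟨d, by omega, hg⟩
          · exact ⟨c + 1, le_refl _, (hprod z).1 hz⟩
        · rintro ⟨d, hd, hg⟩
          rcases Nat.lt_or_ge d (c + 1) with hlt | hge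
          · exact Or.inl ((hseen z).2 ⟨d, by omega, hg⟩)
          · have : d = c + 1 := by omega
            subst this
            exact Or.inr ((hprod z).2 hg)
      have hfr' : ∀ z, z ∈ (((frontier.map (fun s => (pvRem key attrs).map (fun a => (s, a)))).flatten).foldl pvPairStep (seen, [])).2 ↔
          pvExGen key attrs (c + 1) z := by
        intro z
        rw [h2 z]
        constructor
        · rintro (hz | ⟨-, hz⟩)
          · simp at hz
          · exact (hprod z).1 hz
        · intro hg
          refine Or.inr ⟨?_, (hprod z).2 hg⟩
          intro hz
          obtain ⟨d, hd, hg'⟩ := (hseen z).1 hz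
          have := pvExGen_unique hg hg'
          omega
      have := ih (c + 1) _ _ hseen' hfr' y
      rw [this]
      constructor
      · rintro ⟨d, hd, hg⟩; exact ⟨d, by omega, hg⟩
      · rintro ⟨d, hd, hg⟩; exact ⟨d, by omega, hg⟩

def pvBset (candidate_keys : List (List String)) (attributes : List String) (max_comb_size : Int) :
    PySem.Set (List String) :=
  candidate_keys.foldl (fun superkeys key =>
    (bfsGrow (PySem.Set.diff (PySem.Set.ofList attributes) (PySem.Set.ofList key))
      (if max_comb_size ≠ 0 then max_comb_size
       else (((PySem.Set.diff (PySem.Set.ofList attributes) (PySem.Set.ofList key)).length : Int))).toNat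
      (PySem.Set.ofList [([] : List String)]) [[]]).foldl
      (fun superkeys ex =>
        PySem.Set.add superkeys
          (pvCanon (PySem.Set.union (PySem.Set.ofList key)
            (PySem.Set.ofList ((PySem.Set.diff (PySem.Set.ofList attributes) (PySem.Set.ofList key)).filter
              (fun a => decide (a ∈ ex))))))) superkeys) PySem.Set.empty

lemma B_eq (candidate_keys : List (List String)) (attributes : List String) (max_comb_size : Int) :
    find_superkeys_alt candidate_keys attributes max_comb_size =
      (PySem.List.sorted2 (pvBset candidate_keys attributes max_comb_size)
        (fun x => (x.length : Int)) (fun x => PySem.List.sorted x (fun y => y))).map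
        (fun sk => PySem.Set.ofList sk) := rfl

lemma depth_eq_pvBnd (key attrs : List String) (m : Int) :
    (if m ≠ 0 then m else (((pvRem key attrs).length : Int))) = pvBnd key attrs m := by
  unfold pvBnd
  by_cases h : m = 0 <;> simp [h]

-- per-key: the bfs result's members are exactly the canonical extras sets of size ≤ depth
lemma bfs_seen_mem (key attrs : List String) (m : Int) (z : List String) :
    z ∈ bfsGrow (pvRem key attrs)
      (if m ≠ 0 then m else (((pvRem key attrs).length : Int))).toNat
      (PySem.Set.ofList [([] : List String)]) [[]] ↔
    ∃ d ≤ (pvBnd key attrs m).toNat, pvExGen key attrs d z := by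
  rw [depth_eq_pvBnd key attrs m]
  have hseen : ∀ w, w ∈ PySem.Set.ofList [([] : List String)] ↔
      ∃ d ≤ 0, pvExGen key attrs d w := by
    intro w
    rw [PySem.Set.mem_ofList]
    simp only [List.mem_singleton, Nat.le_zero]
    constructor
    · rintro rfl; exact ⟨0, rfl, (pvExGen_zero _ _ _).2 rfl⟩
    · rintro ⟨d, rfl, hg⟩; exact (pvExGen_zero _ _ _).1 hg
  have hfr : ∀ w, w ∈ [([] : List String)] ↔ pvExGen key attrs 0 w := by
    intro w
    simp only [List.mem_singleton]
    exact ⟨fun h => (pvExGen_zero _ _ _).2 h, fun h => (pvExGen_zero _ _ _).1 h⟩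
  have := bfsGrow_mem key attrs (pvBnd key attrs m).toNat 0 _ _ hseen hfr z
  rw [this]
  constructor
  · rintro ⟨d, hd, hg⟩; exact ⟨d, by omega, hg⟩
  · rintro ⟨d, hd, hg⟩; exact ⟨d, by omega, hg⟩

lemma mem_pvBset_aux (attributes : List String) (max_comb_size : Int) :
    ∀ (cks : List (List String)) (acc : PySem.Set (List String)) (y : List String),
      y ∈ cks.foldl (fun superkeys key =>
        (bfsGrow (PySem.Set.diff (PySem.Set.ofList attributes) (PySem.Set.ofList key))
          (if max_comb_size ≠ 0 then max_comb_size
           else (((PySem.Set.diff (PySem.Set.ofList attributes) (PySem.Set.ofList key)).length : Int))).toNat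
          (PySem.Set.ofList [([] : List String)]) [[]]).foldl
          (fun superkeys ex =>
            PySem.Set.add superkeys
              (pvCanon (PySem.Set.union (PySem.Set.ofList key)
                (PySem.Set.ofList ((PySem.Set.diff (PySem.Set.ofList attributes) (PySem.Set.ofList key)).filter
                  (fun a => decide (a ∈ ex))))))) superkeys) acc ↔
      y ∈ acc ∨ ∃ key ∈ cks, ∃ d ≤ (pvBnd key attributes max_comb_size).toNat, pvGen key attributes d y := by
  intro cks
  induction cks with
  | nil => intro acc y; simp
  | cons k cks ih =>
    intro acc y
    rw [List.foldl_cons, ih]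
    have hstep : y ∈ (bfsGrow (PySem.Set.diff (PySem.Set.ofList attributes) (PySem.Set.ofList k))
        (if max_comb_size ≠ 0 then max_comb_size
         else (((PySem.Set.diff (PySem.Set.ofList attributes) (PySem.Set.ofList k)).length : Int))).toNat
        (PySem.Set.ofList [([] : List String)]) [[]]).foldl
        (fun superkeys ex =>
          PySem.Set.add superkeys
            (pvCanon (PySem.Set.union (PySem.Set.ofList k)
              (PySem.Set.ofList ((PySem.Set.diff (PySem.Set.ofList attributes) (PySem.Set.ofList k)).filter
                (fun a => decide (a ∈ ex))))))) acc ↔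
        y ∈ acc ∨ ∃ d ≤ (pvBnd k attributes max_comb_size).toNat, pvGen k attributes d y := by
      rw [PySem.Set.mem_foldl_add]
      constructor
      · rintro (hy | ⟨ex, hex, rfl⟩)
        · exact Or.inl hy
        · obtain ⟨d, hd, E, hsubE, hlen, rfl⟩ := (bfs_seen_mem k attributes max_comb_size ex).1 hex
          refine Or.inr ⟨d, hd, E, hsubE, hlen, ?_⟩
          apply pvCanon_ext
          intro x
          simp only [PySem.Set.mem_union, PySem.Set.mem_ofList, List.mem_filter, List.mem_append,
            mem_pvCanon, decide_eq_true_eq]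
          constructor
          · rintro (h | ⟨-, h⟩)
            · exact Or.inl h
            · exact Or.inr h
          · rintro (h | h)
            · exact Or.inl h
            · exact Or.inr ⟨hsubE.subset h, h⟩
      · rintro (hy | ⟨d, hd, E, hsubE, hlen, rfl⟩)
        · exact Or.inl hy
        · refine Or.inr ⟨pvCanon E,
            (bfs_seen_mem k attributes max_comb_size (pvCanon E)).2 ⟨d, hd, E, hsubE, hlen, rfl⟩, ?_⟩
          apply pvCanon_ext
          intro x
          simp only [PySem.Set.mem_union, PySem.Set.mem_ofList, List.mem_filter, List.mem_append,
            mem_pvCanon, decide_eq_true_eq]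
          constructor
          · rintro (h | h)
            · exact Or.inl h
            · exact Or.inr ⟨hsubE.subset h, h⟩
          · rintro (h | ⟨-, h⟩)
            · exact Or.inl h
            · exact Or.inr h
    rw [hstep]
    constructor
    · rintro ((hy | hk) | ⟨key, hkey, hrest⟩)
      · exact Or.inl hy
      · exact Or.inr ⟨k, List.mem_cons_self, hk⟩
      · exact Or.inr ⟨key, List.mem_cons_of_mem _ hkey, hrest⟩
    · rintro (hy | ⟨key, hkey, hrest⟩)
      · exact Or.inl (Or.inl hy)
      · rcases List.mem_cons.1 hkey with rfl | hkey'
        · exact Or.inl (Or.inr hrest)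
        · exact Or.inr ⟨key, hkey', hrest⟩

lemma mem_pvBset (candidate_keys : List (List String)) (attributes : List String) (max_comb_size : Int)
    (y : List String) :
    y ∈ pvBset candidate_keys attributes max_comb_size ↔
      pvChar candidate_keys attributes max_comb_size y := by
  unfold pvBset pvChar
  rw [mem_pvBset_aux]
  simp [PySem.Set.empty]

lemma nodup_pvBset (candidate_keys : List (List String)) (attributes : List String) (max_comb_size : Int) :
    (pvBset candidate_keys attributes max_comb_size).Nodup := by
  unfold pvBset
  generalize hacc : PySem.Set.empty = acc
  have hnd : acc.Nodup := by rw [← hacc]; exact List.nodup_nil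
  clear hacc
  induction candidate_keys generalizing acc with
  | nil => exact hnd
  | cons k cks ih =>
    rw [List.foldl_cons]
    exact ih _ (nodup_foldl_add _ _ _ hnd)

-- ---------- the final sort ----------
lemma sorted2_eq_sorted_lex (xs : List (List String)) :
    PySem.List.sorted2 xs (fun x => (x.length : Int)) (fun x => PySem.List.sorted x (fun y => y)) =
      PySem.List.sorted xs
        (fun x => toLex ((x.length : Int), PySem.List.sorted x (fun y => y))) := by
  rw [PySem.List.sorted_eq_foldl_insertBy]
  unfold PySem.List.sorted2
  simp only [Bool.false_eq_true, if_false]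
  have hfun : (fun (a b : List String) =>
        decide ((a.length : Int) < (b.length : Int)) ||
          (!decide ((b.length : Int) < (a.length : Int)) &&
            decide (PySem.List.sorted a (fun y => y) < PySem.List.sorted b (fun y => y)))) =
      (fun (a b : List String) =>
        decide (toLex ((a.length : Int), PySem.List.sorted a (fun y => y)) <
          toLex ((b.length : Int), PySem.List.sorted b (fun y => y)))) := by
    funext a b
    by_cases h1 : (a.length : Int) < (b.length : Int)
    · simp [h1, Prod.Lex.lt_iff]
    · by_cases h2 : (b.length : Int) < (a.length : Int)
      · have hne : ¬ ((a.length : Int) = (b.length : Int)) := by omega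
        simp [h1, h2, Prod.Lex.lt_iff, hne]
      · have he : (a.length : Int) = (b.length : Int) := by omega
        simp [Prod.Lex.lt_iff, he]
  rw [hfun]

lemma sorted_canonsets_eq (A B : List (List String)) (hA : A.Nodup) (hB : B.Nodup)
    (hmem : ∀ y, y ∈ A ↔ y ∈ B) (hshape : ∀ y ∈ A, PySem.List.sorted y (fun x => x) = y) :
    PySem.List.sorted A (fun x => toLex ((x.length : Int), PySem.List.sorted x (fun y => y))) =
      PySem.List.sorted B (fun x => toLex ((x.length : Int), PySem.List.sorted x (fun y => y))) := by
  set key : List String → Lex (Int × List String) :=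
    fun x => toLex ((x.length : Int), PySem.List.sorted x (fun y => y)) with hkey
  have hperm : A.Perm B := (List.perm_ext_iff_of_nodup hA hB).mpr hmem
  refine (PySem.List.sorted_eq_of_perm_of_pairwise_lt B (PySem.List.sorted A key) key ?_ ?_).symm
  · exact (PySem.List.sorted_perm A key false).trans hperm
  · have hle : (PySem.List.sorted A key).Pairwise (fun a b => key a ≤ key b) :=
      PySem.List.sorted_pairwise A key
    have hnd : (PySem.List.sorted A key).Nodup :=
      ((PySem.List.sorted_perm A key false).nodup_iff).mpr hA
    have hand : (PySem.List.sorted A key).Pairwise (fun a b => key a ≤ key b ∧ a ≠ b) :=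
      hle.and hnd
    refine hand.imp_of_mem ?_
    intro a b hma hmb hab
    have haA : a ∈ A := (PySem.List.mem_sorted A key false a).1 hma
    have hbA : b ∈ A := (PySem.List.mem_sorted A key false b).1 hmb
    refine lt_of_le_of_ne hab.1 ?_
    intro hk
    apply hab.2
    have h2 := congrArg (fun p : Lex (Int × List String) => (ofLex p).2) hk
    simp only [hkey] at h2
    rw [hshape a haA, hshape b hbA] at h2
    exact h2

lemma shape_pvAset (candidate_keys : List (List String)) (attributes : List String) (max_comb_size : Int) :
    ∀ y ∈ pvAset candidate_keys attributes max_comb_size,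
      PySem.List.sorted y (fun x => x) = y := by
  intro y hy
  obtain ⟨k, -, d, -, E, -, -, rfl⟩ := (mem_pvAset candidate_keys attributes max_comb_size y).1 hy
  exact sorted_pvCanon _

-- ===== VERDICT (by name: the statement is the Claim_ definition above) =====
theorem find_superkeys_spec : Claim_equal_find_superkeys := by
  intro candidate_keys attributes max_comb_size _
  unfold Spec_find_superkeys
  rw [A_eq, B_eq, sorted2_eq_sorted_lex, sorted2_eq_sorted_lex]
  rw [sorted_canonsets_eq (pvAset candidate_keys attributes max_comb_size)
    (pvBset candidate_keys attributes max_comb_size)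
    (nodup_pvAset _ _ _) (nodup_pvBset _ _ _)
    (fun y => (mem_pvAset _ _ _ y).trans (mem_pvBset _ _ _ y).symm)
    (shape_pvAset _ _ _)]
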